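-- pv_equiv track=rewrite | github.com/mateobaricevic/advent-of-code | 2020/day17/main.py | addSpace3d
-- ===== SOURCE A (Python) =====
-- def addSpace3d(space):
--     new_space = {}
--     for i in range(min(space.keys()) - 1, max(space.keys()) + 2):
--         new_list = []
--         if i in space.keys():
--             for j in range(-1, len(space[i]) + 1):
--                 if 0 <= j < len(space[i]):
--                     new_row = ""
--                     for k in range(-1, len(space[i][j]) + 1):
--                         if 0 <= k < len(space[i][j]):
--                             new_row += space[i][j][k]
--                         else:
--                             new_row += '.'
--                     new_list.append(new_row)
--                 else:
--                     new_list.append('.' * (len(space[i]) + 2))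
--             new_space[i] = new_list
--         else:
--             string = '.' * (len(space[0]) + 2)
--             new_space[i] = [string for _ in range(len(string))]
--     return new_space
-- ===== SOURCE B (Python) =====
-- def addSpace3d(space):
--     new_space = {}
--     for i in range(min(space) - 1, max(space) + 2):
--         if i in space:
--             layer = space[i]
--             border = '.' * (len(layer) + 2)
--             new_space[i] = [border] + ['.' + row + '.' for row in layer] + [border]
--         else:
--             size = len(space[0]) + 2
--             new_space[i] = ['.' * size] * size
--     return new_space
-- ===== Notes on version B (the rewrite author's own statement) =====
-- stated objective: simpler
-- what changed: B iterates directly over the stored rows, padding each whole row with '.'+row+'.' and adding explicit border rows (and a replicated square for absent layers), instead of A's loops over output coordinates with per-index bounds checks building rows character by character.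
import Mathlib
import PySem

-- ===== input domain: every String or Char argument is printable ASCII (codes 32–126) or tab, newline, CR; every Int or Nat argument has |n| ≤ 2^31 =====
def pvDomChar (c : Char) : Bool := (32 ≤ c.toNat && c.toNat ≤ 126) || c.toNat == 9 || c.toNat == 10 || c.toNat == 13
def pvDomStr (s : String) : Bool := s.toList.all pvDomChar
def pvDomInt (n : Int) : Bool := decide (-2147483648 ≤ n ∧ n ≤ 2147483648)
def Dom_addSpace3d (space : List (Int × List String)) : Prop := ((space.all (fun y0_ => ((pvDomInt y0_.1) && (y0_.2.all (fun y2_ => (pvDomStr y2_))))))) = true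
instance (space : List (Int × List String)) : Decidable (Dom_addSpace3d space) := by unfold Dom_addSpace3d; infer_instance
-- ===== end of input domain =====

-- B pads each stored row by whole-row string concatenation and prepends/appends explicit
-- border rows, instead of A's iteration over output coordinates with per-index bounds checks
-- (same asymptotic cost; objective: simpler).

-- ===== PORT A =====
-- Python strings are handled at the List Char level (PySem.Chars representation);
-- new_row += c is the fold appending one character.
def aRowChars (row : List Char) : List Char :=
  (PySem.List.pyRange (-1) ((row.length : Int) + 1) 1).foldl
    (fun nr k =>
      if 0 ≤ k ∧ k < (row.length : Int) then
        nr ++ (PySem.List.pyGet? row k).elim [] (fun c => [c])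
      else nr ++ ['.']) []

def aLayerList (layer : List String) : List String :=
  (PySem.List.pyRange (-1) ((layer.length : Int) + 1) 1).foldl
    (fun nl j =>
      if 0 ≤ j ∧ j < (layer.length : Int) then
        nl ++ [String.mk (aRowChars (PySem.List.pyGetD layer j "").toList)]
      else nl ++ [String.mk (List.replicate (layer.length + 2) '.')]) []

def aLayerStep (d : PySem.Dict Int (List String)) (ns : PySem.Dict Int (List String)) (i : Int) :
    PySem.Dict Int (List String) :=
  if PySem.Dict.contains d i then
    PySem.Dict.insert ns i (aLayerList (PySem.Dict.getD d i []))
  else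
    let s : List Char := List.replicate ((PySem.Dict.getD d 0 []).length + 2) '.'
    PySem.Dict.insert ns i ((PySem.List.pyRange 0 (s.length : Int) 1).map (fun _ => String.mk s))

def addSpace3d (space : List (Int × List String)) : List (Int × List String) :=
  match PySem.List.min? (PySem.Dict.keys (PySem.Dict.mk space)) (fun x => x),
        PySem.List.max? (PySem.Dict.keys (PySem.Dict.mk space)) (fun x => x) with
  | some mn, some mx =>
      ((PySem.List.pyRange (mn - 1) (mx + 2) 1).foldl (aLayerStep (PySem.Dict.mk space)) PySem.Dict.empty).items
  | _, _ => []   -- unreachable under Pre_ (min/max of an empty dict raise in Python)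

-- ===== PORT B =====
def padRow (row : String) : String := String.mk ('.' :: row.toList ++ ['.'])

def bLayerStep (d : PySem.Dict Int (List String)) (ns : PySem.Dict Int (List String)) (i : Int) :
    PySem.Dict Int (List String) :=
  match PySem.Dict.get? d i with
  | some layer =>
      let border : String := String.mk (List.replicate (layer.length + 2) '.')
      PySem.Dict.insert ns i ([border] ++ layer.map padRow ++ [border])
  | none =>
      let size : Nat := (PySem.Dict.getD d 0 []).length + 2
      PySem.Dict.insert ns i (List.replicate size (String.mk (List.replicate size '.')))

def addSpace3d_alt (space : List (Int × List String)) : List (Int × List String) :=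
  match PySem.List.min? (PySem.Dict.keys (PySem.Dict.mk space)) (fun x => x) with
  | none => []
  | some mn =>
    match PySem.List.max? (PySem.Dict.keys (PySem.Dict.mk space)) (fun x => x) with
    | none => []
    | some mx =>
        ((PySem.List.pyRange (mn - 1) (mx + 2) 1).foldl (bLayerStep (PySem.Dict.mk space)) PySem.Dict.empty).items

-- ===== PRECONDITION & SPEC =====
-- Pre_ excludes exactly the inputs where Python A raises — the empty dict (ValueError from
-- min()) and dicts without key 0 (KeyError from space[0], reached on every call at i = min-1) —
-- and assoc lists with duplicate keys, which do not represent a Python dict.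
def Pre_addSpace3d (space : List (Int × List String)) : Prop :=
  (space.map Prod.fst).Nodup ∧ (0 : Int) ∈ space.map Prod.fst
instance (space : List (Int × List String)) : Decidable (Pre_addSpace3d space) := by
  unfold Pre_addSpace3d; infer_instance

def pvWitness_addSpace3d : (List (Int × List String)) := [((0 : Int), ["#"])]

def Spec_addSpace3d (space : List (Int × List String)) (out : List (Int × List String)) : Prop := out = addSpace3d_alt space
instance (space : List (Int × List String)) (out : List (Int × List String)) : Decidable (Spec_addSpace3d space out) := by unfold Spec_addSpace3d; infer_instance

-- ===== CLAIM (what is proved, stated in full; the proofs are below) =====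
def Claim_equal_addSpace3d : Prop := ∀ (space : List (Int × List String)), Dom_addSpace3d space → Pre_addSpace3d space → Spec_addSpace3d space (addSpace3d space)

-- ===== LEMMAS AND PROOFS =====

-- A's k-loop over range(0, n) appends the first n characters of the row.
lemma rowPrefix (l : List Char) (n : Nat) (h : n ≤ l.length) (init : List Char) :
    (PySem.List.pyRange 0 (n : Int) 1).foldl
      (fun nr k =>
        if 0 ≤ k ∧ k < (l.length : Int) then
          nr ++ (PySem.List.pyGet? l k).elim [] (fun c => [c])
        else nr ++ ['.']) init = init ++ l.take n := by
  induction n generalizing init with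
  | zero => simp [PySem.List.pyRange_one_eq_nil]
  | succ n ih =>
      have hn : n < l.length := h
      have hcast : ((n + 1 : Nat) : Int) = (n : Int) + 1 := by push_cast; ring
      rw [hcast, PySem.List.pyRange_one_succ_right (by positivity), List.foldl_append,
        ih (le_of_lt hn)]
      simp only [List.foldl_cons, List.foldl_nil]
      rw [if_pos ⟨by positivity, by exact_mod_cast hn⟩, PySem.List.pyGet?_natCast,
        List.getElem?_eq_getElem hn]
      rw [List.take_succ, List.getElem?_eq_getElem hn]
      simp [List.append_assoc]

-- A's char-by-char row loop builds '.' + row + '.'.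
lemma aRowChars_eq (l : List Char) : aRowChars l = '.' :: l ++ ['.'] := by
  unfold aRowChars
  rw [PySem.List.pyRange_one_cons (by omega), List.foldl_cons]
  have h0 : ¬ ((0 : Int) ≤ -1 ∧ (-1 : Int) < (l.length : Int)) := by omega
  rw [if_neg h0]
  have hsplit : (-1 : Int) + 1 = 0 := by ring
  rw [hsplit, PySem.List.pyRange_one_succ_right (by positivity), List.foldl_append, rowPrefix l l.length le_rfl]
  simp

-- A's j-loop over range(0, n) appends the first n padded rows.
lemma layerPrefix (layer : List String) (n : Nat) (h : n ≤ layer.length) (init : List String) :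
    (PySem.List.pyRange 0 (n : Int) 1).foldl
      (fun nl j =>
        if 0 ≤ j ∧ j < (layer.length : Int) then
          nl ++ [String.mk (aRowChars (PySem.List.pyGetD layer j "").toList)]
        else nl ++ [String.mk (List.replicate (layer.length + 2) '.')]) init
    = init ++ (layer.take n).map padRow := by
  induction n generalizing init with
  | zero => simp [PySem.List.pyRange_one_eq_nil]
  | succ n ih =>
      have hn : n < layer.length := h
      have hcast : ((n + 1 : Nat) : Int) = (n : Int) + 1 := by push_cast; ring
      rw [hcast, PySem.List.pyRange_one_succ_right (by positivity), List.foldl_append,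
        ih (le_of_lt hn)]
      simp only [List.foldl_cons, List.foldl_nil]
      rw [if_pos (by exact ⟨by positivity, by exact_mod_cast hn⟩)]
      rw [PySem.List.pyGetD_natCast, List.getD_eq_getElem?_getD, List.getElem?_eq_getElem hn,
        Option.getD_some, aRowChars_eq, List.take_succ, List.getElem?_eq_getElem hn]
      simp only [Option.toList_some, List.append_assoc, List.map_append,
        List.map_cons, List.map_nil]
      simp [padRow]

-- A's j-loop builds border row, padded rows, border row.
lemma aLayerList_eq (layer : List String) :
    aLayerList layer =
      [String.mk (List.replicate (layer.length + 2) '.')] ++ layer.map padRow ++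
        [String.mk (List.replicate (layer.length + 2) '.')] := by
  unfold aLayerList
  rw [PySem.List.pyRange_one_cons (by omega), List.foldl_cons]
  have h0 : ¬ ((0 : Int) ≤ -1 ∧ (-1 : Int) < (layer.length : Int)) := by omega
  rw [if_neg h0]
  have hsplit : (-1 : Int) + 1 = 0 := by ring
  rw [hsplit, PySem.List.pyRange_one_succ_right (by positivity),
    List.foldl_append, layerPrefix layer layer.length le_rfl]
  simp

-- range(len(s)) mapped to a constant is a replicate.
lemma mapConstRange {α : Type} (n : Nat) (s : α) :
    (PySem.List.pyRange 0 (n : Int) 1).map (fun _ => s) = List.replicate n s := by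
  have hlen : (PySem.List.pyRange 0 (n : Int) 1).length = n := by
    rw [PySem.List.length_pyRange_one]; omega
  rw [List.map_const', hlen]

-- the two per-layer loop bodies agree.
lemma step_eq (d : PySem.Dict Int (List String)) : aLayerStep d = bLayerStep d := by
  funext ns i
  unfold aLayerStep bLayerStep
  cases h : PySem.Dict.get? d i with
  | none =>
      rw [PySem.Dict.contains_eq_isSome_get?, h]
      simp only [Option.isSome_none, Bool.false_eq_true, if_false, List.length_replicate]
      rw [mapConstRange]
  | some layer =>
      rw [PySem.Dict.contains_eq_isSome_get?, h]
      simp only [Option.isSome_some, if_true]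
      rw [PySem.Dict.getD_eq_get?_getD, h, Option.getD_some, aLayerList_eq]

-- ===== VERDICT (by name: the statement is the Claim_ definition above) =====
theorem addSpace3d_spec : Claim_equal_addSpace3d := by
  intro space _ _
  unfold Spec_addSpace3d addSpace3d addSpace3d_alt
  rw [step_eq]
  cases PySem.List.min? (PySem.Dict.keys (PySem.Dict.mk space)) (fun x => x) with
  | none => rfl
  | some mn =>
      cases PySem.List.max? (PySem.Dict.keys (PySem.Dict.mk space)) (fun x => x) with
      | none => rfl
      | some mx => rfl
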